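-- pv_equiv track=rewrite | github.com/binSmile/python-training | Yandex algo-train/Train 1/T1 Lesson 3/T1 Lesson 3 Problem F. Alien  genome.py | solution_slow
-- ===== SOURCE A (Python) =====
-- def solution_slow(g1, g2):
--     g1_pairs = {}
--     g2_pairs = set()
--     compare = 0
--
--     if len(g1) > 1 and len(g2) > 1:
--         for i in range(len(g1)-1):
--             d = g1[i:i+2]
--             g1_pairs[g1[i:i+2]] = g1_pairs.setdefault(g1[i:i+2],0) + 1
--         for i in range(len(g2)-1):
--             g2_pairs.add(g2[i:i+2])
--
--         for i in g2_pairs: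
--             compare += g1_pairs.setdefault(i,0)
--     return compare
-- ===== SOURCE B (Python) =====
-- def solution_slow(g1, g2):
--     # B: table g2's pairs as a set, scan g1's positions and count hits (A tables
--     # g1's pair counts in a dict and sums them over g2's distinct pairs).
--     if len(g1) > 1 and len(g2) > 1:
--         g2set = {g2[i:i+2] for i in range(len(g2) - 1)}
--         return sum(1 for i in range(len(g1) - 1) if g1[i:i+2] in g2set)
--     return 0
-- ===== Notes on version B (the rewrite author's own statement) =====
-- stated objective: simpler
-- what changed: Inverts the roles of the two strings: instead of building a count dict of g1's pairs and summing those counts over the distinct pairs of g2, B builds a set of g2's pairs once and makes a single counting scan over g1's positions.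
import Mathlib
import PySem

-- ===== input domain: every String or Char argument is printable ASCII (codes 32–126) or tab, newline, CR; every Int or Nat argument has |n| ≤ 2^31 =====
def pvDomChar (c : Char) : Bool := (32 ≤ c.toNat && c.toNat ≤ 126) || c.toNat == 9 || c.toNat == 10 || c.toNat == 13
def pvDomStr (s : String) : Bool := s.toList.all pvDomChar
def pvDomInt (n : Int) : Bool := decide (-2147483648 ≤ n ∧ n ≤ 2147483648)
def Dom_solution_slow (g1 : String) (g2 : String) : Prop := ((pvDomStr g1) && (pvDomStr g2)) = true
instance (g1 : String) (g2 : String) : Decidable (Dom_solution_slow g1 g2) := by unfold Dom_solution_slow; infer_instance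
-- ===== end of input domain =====

-- B inverts which string is tabled: a set of g2's pairs and one counting scan over g1,
-- instead of A's count dict of g1's pairs summed over g2's distinct pairs (objective: simpler).

-- ===== PORT A =====
-- Literal port of A: count dict of g1's adjacent pairs, set of g2's pairs, then a loop
-- over the set summing `g1_pairs.setdefault(p, 0)` (the setdefault mutation is kept as state).
def solution_slow (g1 : String) (g2 : String) : Int :=
  if 1 < PySem.Str.len g1 ∧ 1 < PySem.Str.len g2 then
    let g1_pairs : PySem.Dict String Int :=
      (PySem.List.pyRange 0 (PySem.Str.len g1 - 1)).foldl
        (fun d i => d.insert (PySem.Str.slice g1 (some i) (some (i + 2)))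
            (d.getD (PySem.Str.slice g1 (some i) (some (i + 2))) 0 + 1))
        PySem.Dict.empty
    let g2_pairs : PySem.Set String :=
      (PySem.List.pyRange 0 (PySem.Str.len g2 - 1)).foldl
        (fun s i => s.add (PySem.Str.slice g2 (some i) (some (i + 2)))) PySem.Set.empty
    (g2_pairs.foldl
      (fun (st : PySem.Dict String Int × Int) p =>
        (st.1.setdefault p 0, st.2 + st.1.getD p 0)) (g1_pairs, 0)).2
  else 0

-- ===== PORT B =====
-- Port of Source B: set of g2's pairs, then one counting scan over g1's positions.
def solution_slow_alt (g1 : String) (g2 : String) : Int :=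
  if 1 < PySem.Str.len g1 ∧ 1 < PySem.Str.len g2 then
    let g2set : PySem.Set String :=
      (PySem.List.pyRange 0 (PySem.Str.len g2 - 1)).foldl
        (fun s i => s.add (PySem.Str.slice g2 (some i) (some (i + 2)))) PySem.Set.empty
    (PySem.List.pyRange 0 (PySem.Str.len g1 - 1)).foldl
      (fun c i => if g2set.contains (PySem.Str.slice g1 (some i) (some (i + 2))) then c + 1 else c) 0
  else 0

-- ===== PRECONDITION & SPEC =====
def Spec_solution_slow (g1 : String) (g2 : String) (out : Int) : Prop := out = solution_slow_alt g1 g2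
instance (g1 : String) (g2 : String) (out : Int) : Decidable (Spec_solution_slow g1 g2 out) := by unfold Spec_solution_slow; infer_instance

-- ===== CLAIM (what is proved, stated in full; the proofs are below) =====
def Claim_equal_solution_slow : Prop := ∀ (g1 : String) (g2 : String), Dom_solution_slow g1 g2 → Spec_solution_slow g1 g2 (solution_slow g1 g2)

-- ===== LEMMAS AND PROOFS =====

-- A's `compare` loop: the setdefault mutation never changes a `getD · 0` value, so the
-- loop just sums `d.getD p 0` over the set's elements.
lemma cmp_fold (S : List String) (d : PySem.Dict String Int) (c : Int) :
    (S.foldl (fun (st : PySem.Dict String Int × Int) p =>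
        (st.1.setdefault p 0, st.2 + st.1.getD p 0)) (d, c)).2
      = c + (S.map (fun p => d.getD p 0)).sum := by
  induction S generalizing d c with
  | nil => simp
  | cons p S ih =>
    have hall : ∀ q, (d.setdefault p 0).getD q 0 = d.getD q 0 := by
      intro q
      by_cases hq : q = p
      · subst hq; rw [PySem.Dict.getD_setdefault_self]
      · rw [PySem.Dict.getD_eq_get?_getD, PySem.Dict.get?_setdefault_of_ne d 0 hq,
          ← PySem.Dict.getD_eq_get?_getD]
    simp only [List.foldl_cons, List.map_cons, List.sum_cons, ih, hall]
    ring

-- counting with a fresh head: with p outside S the two membership tests are disjoint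
lemma countP_or_disjoint (p : String) (S ps : List String) (hp : p ∉ S) :
    ps.countP (fun x => decide (x = p) || decide (x ∈ S))
      = ps.count p + ps.countP (fun x => decide (x ∈ S)) := by
  induction ps with
  | nil => simp
  | cons a ps ih =>
    by_cases hap : a = p
    · subst hap
      simp [ih, hp]
      omega
    · by_cases haS : a ∈ S
      · simp [ih, hap, haS]
        omega
      · simp [ih, hap, haS]

-- the core exchange: summing g1-pair counts over the distinct pairs of g2 equals
-- counting g1's positions whose pair lies in the set
lemma sum_count_eq_countP (S ps : List String) (h : S.Nodup) :
    (S.map (fun p => ((ps.count p : Nat) : Int))).sum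
      = ((ps.countP (fun x => decide (x ∈ S)) : Nat) : Int) := by
  induction S with
  | nil => simp
  | cons p S ih =>
    have hp : p ∉ S := (List.nodup_cons.mp h).1
    have hS : S.Nodup := (List.nodup_cons.mp h).2
    have : ps.countP (fun x => decide (x ∈ p :: S))
        = ps.count p + ps.countP (fun x => decide (x ∈ S)) := by
      rw [← countP_or_disjoint p S ps hp]
      apply List.countP_congr
      intro x _
      by_cases hxp : x = p <;> by_cases hxS : x ∈ S <;> simp [List.mem_cons, hxp, hxS]
    rw [List.map_cons, List.sum_cons, ih hS, this]
    push_cast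
    ring

-- both loop nests, abstracted over the pair-extraction maps and index ranges
lemma master (f1 f2 : Int → String) (r1 r2 : List Int) :
    ((List.foldl (fun s i => s.add (f2 i)) PySem.Set.empty r2).foldl
        (fun (st : PySem.Dict String Int × Int) p =>
          (st.1.setdefault p 0, st.2 + st.1.getD p 0))
        (List.foldl (fun d i => d.insert (f1 i) (d.getD (f1 i) 0 + 1)) PySem.Dict.empty r1, 0)).2
    = List.foldl (fun c i =>
        if (List.foldl (fun s i => s.add (f2 i)) PySem.Set.empty r2).contains (f1 i)
        then c + 1 else c) 0 r1 := by
  have hS : List.foldl (fun s i => s.add (f2 i)) PySem.Set.empty r2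
      = PySem.Set.ofList (r2.map f2) := by
    rw [PySem.Set.ofList_eq_foldl, List.foldl_map, PySem.Set.empty_eq]
  have hfold : List.foldl (fun d i => d.insert (f1 i) (d.getD (f1 i) 0 + 1))
        (PySem.Dict.empty : PySem.Dict String Int) r1
      = List.foldl (fun d x => d.insert x (d.getD x 0 + 1)) PySem.Dict.empty (r1.map f1) := by
    rw [List.foldl_map]
  have hcnt : ∀ p, (List.foldl (fun d i => d.insert (f1 i) (d.getD (f1 i) 0 + 1))
        (PySem.Dict.empty : PySem.Dict String Int) r1).getD p 0
      = (((r1.map f1).count p : Nat) : Int) := by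
    intro p
    rw [hfold, PySem.Dict.getD_foldl_insert_add_one, PySem.Dict.getD_empty, zero_add]
  rw [cmp_fold, hS, PySem.List.foldl_count_if, zero_add, zero_add]
  simp only [hcnt]
  rw [sum_count_eq_countP _ _ (PySem.Set.nodup_ofList (r2.map f2))]
  congr 1
  rw [List.countP_map]
  apply List.countP_congr
  intro x _
  simp [Function.comp]

theorem solution_slow_eq_alt (g1 g2 : String) :
    solution_slow g1 g2 = solution_slow_alt g1 g2 := by
  unfold solution_slow solution_slow_alt
  split_ifs with h
  · exact master (fun i => PySem.Str.slice g1 (some i) (some (i + 2)))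
      (fun i => PySem.Str.slice g2 (some i) (some (i + 2)))
      (PySem.List.pyRange 0 (PySem.Str.len g1 - 1))
      (PySem.List.pyRange 0 (PySem.Str.len g2 - 1))
  · rfl

-- ===== VERDICT (by name: the statement is the Claim_ definition above) =====
theorem solution_slow_spec : Claim_equal_solution_slow := by
  intro g1 g2 _
  unfold Spec_solution_slow
  exact solution_slow_eq_alt g1 g2
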